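-- pv_equiv track=rewrite | github.com/dIOGOLOC/codes_escritos | zooxantela_toolkit/assessment_py/status_assessment.py | list_split_day
-- ===== SOURCE A (Python) =====
-- def list_split_day(lst_status_files):
-- 	"""
-- 	Returns the list of status files filtered by day
-- 	"""
-- 	day_lst = []
-- 	for i in lst_status_files:
-- 		day_lst.append(i.split('/')[-1].split('_')[0])
-- 	day_lst = sorted(list(set(day_lst)))
--
-- 	daily_lst = [[]]*len(day_lst)
-- 	for i,j in enumerate(day_lst):
-- 		daily_lst[i] = [k for k in lst_status_files if j == k.split('/')[-1].split('_')[0]]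
--
-- 	return daily_lst
-- ===== SOURCE B (Python) =====
-- def list_split_day(lst_status_files):
-- 	"""
-- 	Returns the list of status files filtered by day
-- 	"""
-- 	groups = {}
-- 	for p in lst_status_files:
-- 		day = p.split('/')[-1].split('_')[0]
-- 		groups.setdefault(day, []).append(p)
-- 	return [groups[day] for day in sorted(groups)]
-- ===== Notes on version B (the rewrite author's own statement) =====
-- stated objective: faster
-- what changed: B groups the files into a dict in one pass (setdefault/append keyed by the day prefix) and returns the groups in sorted-key order, instead of A's collect-days-then-filter-the-whole-list-once-per-day nested scans.
import Mathlib
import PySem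

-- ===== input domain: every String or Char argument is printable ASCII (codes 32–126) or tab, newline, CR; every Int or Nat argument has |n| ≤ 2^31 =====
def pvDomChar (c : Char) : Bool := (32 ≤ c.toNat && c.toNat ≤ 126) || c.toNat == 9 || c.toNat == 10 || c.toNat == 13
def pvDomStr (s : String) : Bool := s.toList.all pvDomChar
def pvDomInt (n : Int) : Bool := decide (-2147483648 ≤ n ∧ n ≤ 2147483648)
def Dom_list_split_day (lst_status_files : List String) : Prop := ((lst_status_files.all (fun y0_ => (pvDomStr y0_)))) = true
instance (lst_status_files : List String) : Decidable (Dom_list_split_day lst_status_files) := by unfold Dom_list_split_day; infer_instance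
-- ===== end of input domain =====

-- ===== PORT A =====
-- shared day-key: i.split('/')[-1].split('_')[0]  (split? with a nonempty literal sep is
-- always `some` of a nonempty list, so the `getD`/pyGetD defaults are never taken — exact)
def pvDay (s : String) : String :=
  let parts := (PySem.Str.split? s "/").getD []
  let last := PySem.List.pyGetD parts (-1) ""
  PySem.List.pyGetD ((PySem.Str.split? last "_").getD []) 0 ""

def list_split_day (lst_status_files : List String) : List (List String) :=
  let day_lst := lst_status_files.foldl (fun acc i => acc ++ [pvDay i]) []
  let day_lst := PySem.List.sorted (PySem.Set.ofList day_lst) (fun x => x) false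
  let init : List (List String) := List.replicate day_lst.length []
  (PySem.List.enumerate day_lst 0).foldl
    (fun daily p => daily.set p.1.toNat
      (lst_status_files.filter (fun k => p.2 == pvDay k))) init

-- ===== PORT B =====
def list_split_day_alt (lst_status_files : List String) : List (List String) :=
  let groups := lst_status_files.foldl
    (fun d p => d.modify (pvDay p) [] (fun g => g ++ [p])) PySem.Dict.empty
  -- groups[day] with day ∈ groups.keys: ported as getD (the default is never taken)
  (PySem.List.sorted groups.keys (fun x => x) false).map (fun day => groups.getD day [])

-- ===== PRECONDITION & SPEC =====
def Spec_list_split_day (lst_status_files : List String) (out : List (List String)) : Prop := out = list_split_day_alt lst_status_files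
instance (lst_status_files : List String) (out : List (List String)) : Decidable (Spec_list_split_day lst_status_files out) := by unfold Spec_list_split_day; infer_instance

-- ===== CLAIM (what is proved, stated in full; the proofs are below) =====
def Claim_equal_list_split_day : Prop := ∀ (lst_status_files : List String), Dom_list_split_day lst_status_files → Spec_list_split_day lst_status_files (list_split_day lst_status_files)

-- ===== LEMMAS AND PROOFS =====

-- A's first loop builds exactly the list of day keys
theorem pv_foldl_append_map (l : List String) (acc : List String) :
    l.foldl (fun acc i => acc ++ [pvDay i]) acc = acc ++ l.map pvDay := by
  induction l generalizing acc with
  | nil => simp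
  | cons x xs ih => simp [List.foldl_cons, ih, List.append_assoc]

-- A's index-assignment loop over enumerate fills the replicate-initialised list like a map
theorem pv_setloop (f : String → List String) :
    ∀ (xs : List String) (s : Nat) (init : List (List String)),
      init.length = s + xs.length →
      (PySem.List.enumerate xs (s : Int)).foldl
        (fun daily p => daily.set p.1.toNat (f p.2)) init
      = init.take s ++ xs.map f := by
  intro xs
  induction xs with
  | nil =>
    intro s init h
    rw [PySem.List.enumerate_nil, List.foldl_nil, List.map_nil, List.append_nil]
    exact (List.take_of_length_le (by simp only [List.length_nil] at h; omega)).symm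
  | cons x xs ih =>
    intro s init h
    simp only [List.length_cons] at h
    rw [PySem.List.enumerate_cons, List.foldl_cons]
    have hcast : ((s : Int) + 1) = ((s + 1 : Nat) : Int) := by push_cast; ring
    rw [hcast]
    have := ih (s + 1) (init.set s (f x)) (by rw [List.length_set]; omega)
    simp only [Int.toNat_natCast] at this ⊢
    rw [this]
    have hs : s < init.length := by omega
    have hset : (init.set s (f x)).take (s + 1) = init.take s ++ [f x] := by
      rw [List.set_eq_take_append_cons_drop, if_pos hs]
      rw [List.take_append]
      simp [List.length_take, Nat.min_eq_left (Nat.le_of_lt hs)]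
    rw [hset]
    simp

-- specialisation of pv_setloop to the start index 0 used by the port
theorem pv_setloop0 (f : String → List String) (xs : List String)
    (init : List (List String)) (h : init.length = xs.length) :
    (PySem.List.enumerate xs).foldl
      (fun daily p => daily.set p.1.toNat (f p.2)) init = xs.map f := by
  have := pv_setloop f xs 0 init (by omega)
  simpa using this

-- B's grouping dict: its keys are the distinct day keys in first-occurrence order
theorem pv_keys (l : List String) :
    (l.foldl (fun d p => d.modify (pvDay p) [] (fun g => g ++ [p])) PySem.Dict.empty).keys
      = PySem.Set.ofList (l.map pvDay) := by
  rw [PySem.Dict.keys_foldl_modify_key l pvDay [] (fun _ p g => g ++ [p])]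
  rw [PySem.Set.update_eq_append_filter]
  simp [PySem.Dict.keys, PySem.Dict.empty, PySem.Set.contains]

-- B's grouping dict: looking up a day gives the filter of the original list
theorem pv_getD (l : List String) (c : String) :
    (l.foldl (fun d p => d.modify (pvDay p) [] (fun g => g ++ [p])) PySem.Dict.empty).getD c []
      = l.filter (fun k => pvDay k == c) := by
  have hm : l.foldl (fun d p => d.modify (pvDay p) [] (fun g => g ++ [p])) PySem.Dict.empty
      = (l.map (fun k => (pvDay k, k))).foldl (fun d p => d.modify p.1 [] (fun g => g ++ [p.2])) PySem.Dict.empty := by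
    rw [List.foldl_map]
  rw [hm, PySem.Dict.getD_foldl_modify_append]
  simp [List.filter_map, Function.comp_def, List.map_map]

-- ===== VERDICT (by name: the statement is the Claim_ definition above) =====
theorem list_split_day_spec : Claim_equal_list_split_day := by
  intro l _
  unfold Spec_list_split_day list_split_day list_split_day_alt
  simp only []
  rw [pv_foldl_append_map, List.nil_append]
  rw [pv_setloop0 (fun j => l.filter (fun k => j == pvDay k)) _ _ (by simp)]
  rw [pv_keys]
  apply List.map_congr_left
  intro j _
  rw [pv_getD]
  apply List.filter_congr
  intro k _
  simp [eq_comm]
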